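-- pv_equiv track=rewrite | github.com/Arsen1302/Code-copy-detector | TestData/solutions/problem_1270_5.py | solution_1270_5
-- ===== SOURCE A (Python) =====
-- def solution_1270_5(s):
--     ones_counts = [0, 0] # number of ones in odd indecies and even indecies
--     for i in range(len(s)):
--         if s[i] == '1':
--             ones_counts[i%2] += 1
--     num_ones = ones_counts[0] + ones_counts[1]
--     num_zeros = len(s) - num_ones
--
--     if num_zeros - num_ones > 1 or num_zeros - num_ones < -1:
--         return -1
--     elif num_zeros - num_ones == 1: # num zeroes are num ones + 1
--         #return num_ones - ones_counts[1]
--         return ones_counts[0]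
--     elif num_ones - num_zeros == 1:
--         return ones_counts[1]
--     else:
--         return min(ones_counts[0], ones_counts[1])
-- ===== SOURCE B (Python) =====
-- def solution_1270_5(s):
--     even, odd = s[::2], s[1::2]
--     e = even.count('1')
--     o = odd.count('1')
--     best = None
--     if e + o == len(odd):   # target '0101...' is a permutation of s
--         best = e            # its cost: ones sitting on even positions
--     if e + o == len(even):  # target '1010...' is a permutation of s
--         best = o if best is None else min(best, o)
--     return -1 if best is None else best
-- ===== Notes on version B (the rewrite author's own statement) =====
-- stated objective: faster
-- what changed: B splits the string into its even- and odd-position slices (s[::2], s[1::2]), counts ones per slice with str.count, decides which alternating target is a permutation of s by comparing the total one count with each slice's length, and minimises the cost over the feasible targets as an Optional accumulator, instead of A's single indexed Python loop with parity-indexed one counters and a four-way branch on the zeros-minus-ones difference.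
import Mathlib
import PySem

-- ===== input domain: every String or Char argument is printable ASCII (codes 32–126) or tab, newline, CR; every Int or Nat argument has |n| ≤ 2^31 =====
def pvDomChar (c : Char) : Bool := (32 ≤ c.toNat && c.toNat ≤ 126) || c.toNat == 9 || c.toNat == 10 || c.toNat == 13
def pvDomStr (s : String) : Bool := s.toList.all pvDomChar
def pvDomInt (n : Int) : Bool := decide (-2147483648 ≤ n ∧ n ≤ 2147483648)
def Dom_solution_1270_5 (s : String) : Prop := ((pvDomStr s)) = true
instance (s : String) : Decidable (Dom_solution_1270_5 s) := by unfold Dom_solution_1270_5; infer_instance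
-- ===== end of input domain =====

-- B splits s into its even/odd-position slices (s[::2], s[1::2]) with str.count, checks which
-- alternating target is a permutation of s by slice lengths, and minimises the cost over the
-- feasible targets (objective: faster — slicing/count run in C instead of A's per-char Python loop).

-- ===== PORT A =====
def solution_1270_5 (s : String) : Int :=
  let cs := s.toList
  let oc : Int × Int := (PySem.List.pyRange 0 (cs.length : Int) 1).foldl
    (fun (oc : Int × Int) i =>
      if PySem.List.pyGet? cs i = some '1' then
        if PySem.Int.mod i 2 = 0 then (oc.1 + 1, oc.2) else (oc.1, oc.2 + 1)
      else oc) (0, 0)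
  let num_ones := oc.1 + oc.2
  let num_zeros := (cs.length : Int) - num_ones
  if num_zeros - num_ones > 1 ∨ num_zeros - num_ones < -1 then -1
  else if num_zeros - num_ones = 1 then oc.1
  else if num_ones - num_zeros = 1 then oc.2
  else min oc.1 oc.2

-- ===== PORT B =====
def solution_1270_5_alt (s : String) : Int :=
  let even := (PySem.Str.slice? s none none 2).getD ""
  let odd := (PySem.Str.slice? s (some 1) none 2).getD ""
  let e : Int := (PySem.Str.count even "1" : Nat)
  let o : Int := (PySem.Str.count odd "1" : Nat)
  let best : Option Int := if e + o = PySem.Str.len odd then some e else none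
  let best : Option Int :=
    if e + o = PySem.Str.len even then
      (match best with
       | none => some o
       | some b => some (min b o))
    else best
  match best with
  | none => -1
  | some b => b

-- ===== PRECONDITION & SPEC =====
def Spec_solution_1270_5 (s : String) (out : Int) : Prop := out = solution_1270_5_alt s
instance (s : String) (out : Int) : Decidable (Spec_solution_1270_5 s out) := by unfold Spec_solution_1270_5; infer_instance

-- ===== CLAIM (what is proved, stated in full; the proofs are below) =====
def Claim_equal_solution_1270_5 : Prop := ∀ (s : String), Dom_solution_1270_5 s → Spec_solution_1270_5 s (solution_1270_5 s)

-- ===== LEMMAS AND PROOFS =====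

-- the elements of xs at even positions
def pvEvens {α : Type} : List α → List α
  | [] => []
  | [a] => [a]
  | a :: _ :: t => a :: pvEvens t

lemma pvEvens_cons {α : Type} (a : α) (t : List α) :
    pvEvens (a :: t) = a :: pvEvens t.tail := by
  cases t <;> rfl

lemma pvFM_evens {α : Type} (xs : List α) :
    ∀ m, (xs.length + 1) / 2 ≤ m →
      List.filterMap (fun k => xs[2 * k]?) (List.range m) = pvEvens xs := by
  induction xs using pvEvens.induct with
  | case1 =>
    intro m _
    simp [pvEvens]
  | case2 a =>
    intro m hm
    have hm1 : 1 ≤ m := by simp at hm; omega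
    obtain ⟨m', rfl⟩ : ∃ m', m = m' + 1 := ⟨m - 1, by omega⟩
    rw [List.range_succ_eq_map, List.filterMap_cons, List.filterMap_map]
    simp [pvEvens]
  | case3 a b t ih =>
    intro m hm
    have hm1 : 1 ≤ m := by simp at hm; omega
    obtain ⟨m', rfl⟩ : ∃ m', m = m' + 1 := ⟨m - 1, by omega⟩
    have h0 : (a :: b :: t)[2 * 0]? = some a := rfl
    rw [List.range_succ_eq_map, List.filterMap_cons, List.filterMap_map]
    simp only [h0]
    have hcomp : ((fun k => (a :: b :: t)[2 * k]?) ∘ Nat.succ) = (fun k => t[2 * k]?) := by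
      funext k
      have h21 : 2 * Nat.succ k = 2 * k + 1 + 1 := by omega
      simp [Function.comp, h21]
    rw [hcomp, ih m' (by simp at hm ⊢; omega)]
    rfl

lemma pvLen_evens {α : Type} (xs : List α) :
    (pvEvens xs).length = (xs.length + 1) / 2 := by
  induction xs using pvEvens.induct with
  | case1 => simp [pvEvens]
  | case2 a => simp [pvEvens]
  | case3 a b t ih => simp [pvEvens, ih]; omega

-- A's parity-tracking one-counters, as a structural recursion (p = "current index is even")
def pvG : Bool → List Char → Int × Int
  | _, [] => (0, 0)
  | p, c :: t =>
    let r := pvG (!p) t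
    if c = '1' then (if p then (r.1 + 1, r.2) else (r.1, r.2 + 1)) else r

lemma pvA_fold (cs : List Char) (k : Nat) (hk : k ≤ cs.length) (acc : Int × Int) :
    (PySem.List.pyRange (k : Int) (cs.length : Int) 1).foldl
      (fun (oc : Int × Int) i =>
        if PySem.List.pyGet? cs i = some '1' then
          if PySem.Int.mod i 2 = 0 then (oc.1 + 1, oc.2) else (oc.1, oc.2 + 1)
        else oc) acc
    = (acc.1 + (pvG (k % 2 == 0) (cs.drop k)).1, acc.2 + (pvG (k % 2 == 0) (cs.drop k)).2) := by
  induction hd : cs.length - k generalizing k acc with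
  | zero =>
    have hke : k = cs.length := by omega
    rw [PySem.List.pyRange_one_eq_nil (by exact_mod_cast Nat.le_of_eq hke.symm)]
    simp [hke, pvG]
  | succ m ih =>
    have hlt : k < cs.length := by omega
    have hget : PySem.List.pyGet? cs (k : Int) = some cs[k] :=
      PySem.List.pyGet?_ofNat cs k hlt
    have hm : PySem.Int.mod (k : Int) 2 = ((k % 2 : Nat) : Int) := by
      rw [PySem.Int.mod_eq_emod_of_pos (by omega : (0:Int) < 2)]; push_cast; omega
    have hcast : ((k : Int) + 1) = ((k + 1 : Nat) : Int) := by push_cast; ring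
    rw [PySem.List.pyRange_one_cons (by exact_mod_cast hlt), List.foldl_cons]
    have happ : ∀ a : Int × Int,
        (if PySem.List.pyGet? cs (k : Int) = some '1' then
          if PySem.Int.mod (k : Int) 2 = 0 then (a.1 + 1, a.2) else (a.1, a.2 + 1)
        else a)
        = if cs[k] = '1' then (if k % 2 = 0 then (a.1 + 1, a.2) else (a.1, a.2 + 1)) else a := by
      intro a
      rw [hget, hm]
      rcases Nat.mod_two_eq_zero_or_one k with h | h <;> simp [h]
    rw [happ acc, hcast, ih (k + 1) (by omega) _ (by omega),
      List.drop_eq_getElem_cons hlt]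
    rcases Nat.mod_two_eq_zero_or_one k with h | h <;> by_cases hc : cs[k] = '1' <;>
      simp [pvG, h, hc, Nat.add_mod] <;> omega

-- A's counters are the one-counts of the even/odd slices
lemma pvG_counts (cs : List Char) :
    pvG true cs = (((pvEvens cs).countP (· == '1') : Int),
                   ((pvEvens cs.tail).countP (· == '1') : Int)) ∧
    pvG false cs = (((pvEvens cs.tail).countP (· == '1') : Int),
                    ((pvEvens cs).countP (· == '1') : Int)) := by
  induction cs with
  | nil => simp [pvG, pvEvens]
  | cons a t ih =>
    rw [pvEvens_cons]
    by_cases hc : a = '1' <;>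
      simp [pvG, hc, ih.1, ih.2]

-- Python's str.count with a single-character needle is countP
lemma pvCount_go_one (l : List Char) : ∀ acc,
    PySem.Chars.count.go ['1'] l.length l acc = acc + l.countP (· == '1') := by
  induction l with
  | nil => intro acc; simp [PySem.Chars.count.go]
  | cons c t ih =>
    intro acc
    simp only [List.length_cons, PySem.Chars.count.go, List.countP_cons]
    by_cases hc : c = '1'
    · simp [hc, List.isPrefixOf, ih]; omega
    · simp [List.isPrefixOf, hc, ih, Ne.symm hc]

lemma pvCount_one (l : List Char) :
    PySem.Chars.count l ['1'] = l.countP (· == '1') := by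
  simp [PySem.Chars.count, pvCount_go_one]

-- s[::2] and s[1::2] compute the even- and odd-position slices
lemma pvSlice_even {α : Type} (xs : List α) :
    PySem.List.slice? xs none none 2 = some (pvEvens xs) := by
  unfold PySem.List.slice? PySem.List.sliceIndices
  norm_num
  have hfun : (fun k : Nat => xs[(2 * (k : Int)).toNat]?) = fun k => xs[2 * k]? := by
    funext k; congr 1
  rw [hfun]
  have hcount : (if 0 < xs.length then (((xs.length : Int) + 2 - 1) / 2).toNat else 0)
      = (xs.length + 1) / 2 := by
    split_ifs with h <;> omega
  rw [hcount]
  exact pvFM_evens xs _ le_rfl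

lemma pvSlice_odd {α : Type} (xs : List α) :
    PySem.List.slice? xs (some 1) none 2 = some (pvEvens xs.tail) := by
  unfold PySem.List.slice? PySem.List.sliceIndices
  norm_num
  cases xs with
  | nil => simp [pvEvens]
  | cons a t =>
    have hmin : min (1 : Int) (((a :: t).length : Int)) = 1 := by
      simp
    rw [hmin]
    have hfun : (fun k : Nat => (a :: t)[((1 : Int) + 2 * (k : Int)).toNat]?)
        = fun k => t[2 * k]? := by
      funext k
      have h1 : ((1 : Int) + 2 * (k : Int)).toNat = 2 * k + 1 := by omega
      simp only [h1, List.getElem?_cons_succ]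
    rw [hfun]
    have hcount : (if 1 < (a :: t).length then ((((a :: t).length : Int) - 1 + 2 - 1) / 2).toNat else 0)
        = (t.length + 1) / 2 := by
      simp only [List.length_cons]
      split_ifs with h <;> omega
    rw [hcount]
    exact pvFM_evens t _ le_rfl

-- ===== VERDICT (by name: the statement is the Claim_ definition above) =====
set_option maxHeartbeats 1000000 in
theorem solution_1270_5_spec : Claim_equal_solution_1270_5 := by
  intro s _
  unfold Spec_solution_1270_5 solution_1270_5 solution_1270_5_alt
  have hA := pvA_fold s.toList 0 (Nat.zero_le _) ((0 : Int), (0 : Int))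
  have e0 : ((0 : Nat) % 2 == 0) = true := rfl
  rw [Nat.cast_zero, e0, List.drop_zero] at hA
  have hG := pvG_counts s.toList
  have hEv : PySem.Str.slice? s none none 2 = some (String.ofList (pvEvens s.toList)) := by
    simp [PySem.Str.slice?, PySem.Chars.slice?, pvSlice_even]
  have hOd : PySem.Str.slice? s (some 1) none 2 = some (String.ofList (pvEvens s.toList.tail)) := by
    simp [PySem.Str.slice?, PySem.Chars.slice?, pvSlice_odd]
  have h1s : "1".toList = ['1'] := rfl
  simp only [hA, hG.1, hEv, hOd, Option.getD_some, PySem.Str.count, PySem.Str.len,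
    String.toList_ofList, h1s, pvCount_one, zero_add]
  have hbE : (pvEvens s.toList).countP (· == '1') ≤ (s.toList.length + 1) / 2 := by
    have h := List.countP_le_length (p := (· == '1')) (l := pvEvens s.toList)
    have h2 := pvLen_evens s.toList
    omega
  have hbO : (pvEvens s.toList.tail).countP (· == '1') ≤ s.toList.length / 2 := by
    have h := List.countP_le_length (p := (· == '1')) (l := pvEvens s.toList.tail)
    have h2 := pvLen_evens s.toList.tail
    have htl : s.toList.tail.length = s.toList.length - 1 := by simp
    omega
  have hlE : (pvEvens s.toList).length = (s.toList.length + 1) / 2 := pvLen_evens _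
  have hlO : (pvEvens s.toList.tail).length = s.toList.length / 2 := by
    have := pvLen_evens s.toList.tail
    have htl : s.toList.tail.length = s.toList.length - 1 := by simp
    omega
  rw [hlE, hlO]
  split_ifs <;> (try simp) <;> omega
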